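-- pv_equiv track=rewrite | github.com/wkazmierczak/Introduction_to_Computer_Science_AGH_UST_course | zestaw_4/zad_4.py | najwiekszy_iloraz_suma_rzedu_suma_kolumny
-- ===== SOURCE A (Python) =====
-- def najwiekszy_iloraz_suma_rzedu_suma_kolumny(tab):
--     suma_row = 0
--     biggest_column = 0
--     column = 0
--     row = 0
--
--     for num in tab[0]:
--         suma_row += num
--     smallest_row = suma_row
--
--     # for row in tab:
--     #     suma_row = 0
--     #     for num in row:
--     #         suma_row += num
--     #     if suma_row < smallest_row:
--     #         smallest_row = suma_row
--     #         row_1 = row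
--
--     for x in range(len(tab)):
--         suma_column = 0
--         suma_row = 0
--         for y in range(len(tab)):
--             suma_column += tab[y][x]
--             suma_row += tab[x][y]
--         if suma_row < smallest_row and suma_row != 0:
--             smallest_row = suma_row
--             row = x
--         if suma_column > biggest_column:
--             biggest_column = suma_column
--             column = x
--
--     return column, row
-- ===== SOURCE B (Python) =====
-- def najwiekszy_iloraz_suma_rzedu_suma_kolumny(tab):
--     n = len(tab)
--     seed = sum(tab[0])
--     rowsums = []
--     colsums = [0] * n
--     for x in range(n):
--         rowsums.append(sum(tab[x][y] for y in range(n)))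
--         colsums = [c + tab[x][y] for y, c in enumerate(colsums)]
--     big = max(colsums)
--     column = colsums.index(big) if big > 0 else 0
--     candidates = [s for s in rowsums if s != 0 and s < seed]
--     row = rowsums.index(min(candidates)) if candidates else 0
--     return column, row
-- ===== Notes on version B (the rewrite author's own statement) =====
-- stated objective: alternative
-- what changed: A's interleaved nested scan with four running accumulators is replaced by a row-major sweep that accumulates the column-sum vector element-wise while appending row sums, followed by selection via the builtins max/min/list.index (global extremum plus first-occurrence lookup) instead of any running-comparison scan.
import Mathlib
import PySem

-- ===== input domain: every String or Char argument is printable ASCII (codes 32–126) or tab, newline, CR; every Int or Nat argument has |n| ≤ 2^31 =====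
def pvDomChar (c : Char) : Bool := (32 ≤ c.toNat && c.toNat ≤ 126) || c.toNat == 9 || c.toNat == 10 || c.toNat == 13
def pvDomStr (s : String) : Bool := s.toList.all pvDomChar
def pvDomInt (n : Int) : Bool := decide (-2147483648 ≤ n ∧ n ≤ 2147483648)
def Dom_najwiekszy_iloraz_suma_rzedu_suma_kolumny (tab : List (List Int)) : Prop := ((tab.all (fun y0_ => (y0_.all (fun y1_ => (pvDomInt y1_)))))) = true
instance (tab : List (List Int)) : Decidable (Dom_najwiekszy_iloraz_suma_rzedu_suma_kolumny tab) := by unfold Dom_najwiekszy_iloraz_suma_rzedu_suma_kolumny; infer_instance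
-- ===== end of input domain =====

-- B replaces A's interleaved nested scan (four running accumulators) by a row-major sweep
-- accumulating the column-sum vector element-wise, then selects via max/min + first-index
-- lookup instead of running-comparison scans (objective: alternative, same cost).

-- ===== PORT A =====
-- state: ((smallest_row, row), (biggest_column, column))
def najwiekszy_iloraz_suma_rzedu_suma_kolumny (tab : List (List Int)) : Int × Int :=
  let suma_row0 : Int := (PySem.List.pyGetD tab 0 []).foldl (· + ·) 0
  let n : Int := (tab.length : Int)
  let st :=
    (PySem.List.pyRange 0 n 1).foldl
      (fun (st : (Int × Int) × (Int × Int)) x =>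
        -- inner loop: suma_column and suma_row accumulated together
        let sums :=
          (PySem.List.pyRange 0 n 1).foldl
            (fun (s : Int × Int) y =>
              (s.1 + PySem.List.pyGetD (PySem.List.pyGetD tab y []) x 0,
               s.2 + PySem.List.pyGetD (PySem.List.pyGetD tab x []) y 0))
            (0, 0)
        let sr := if sums.2 < st.1.1 ∧ sums.2 ≠ 0 then (sums.2, x) else st.1
        let bc := if sums.1 > st.2.1 then (sums.1, x) else st.2
        (sr, bc))
      ((suma_row0, 0), (0, 0))
  (st.2.2, st.1.2)

-- ===== PORT B =====
def najwiekszy_iloraz_suma_rzedu_suma_kolumny_alt (tab : List (List Int)) : Int × Int :=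
  let n : Int := (tab.length : Int)
  let seed : Int := (PySem.List.pyGetD tab 0 []).foldl (· + ·) 0
  let idxs := PySem.List.pyRange 0 n 1
  -- one row-major sweep: append this row's sum, add the row element-wise into colsums
  let st := idxs.foldl
    (fun (st : List Int × List Int) x =>
      (st.1 ++ [idxs.foldl (fun (s : Int) y => s + PySem.List.pyGetD (PySem.List.pyGetD tab x []) y 0) 0],
       (PySem.List.enumerate st.2 0).map
         (fun e => e.2 + PySem.List.pyGetD (PySem.List.pyGetD tab x []) e.1 0)))
    ([], List.replicate n.toNat 0)
  let rowsums := st.1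
  let colsums := st.2
  -- max(colsums) raises on [] in Python; .getD totalizes (Pre_ excludes tab = [])
  let big : Int := (PySem.List.max? colsums (fun s => s)).getD 0
  let column : Int := if big > 0 then ((PySem.List.index? colsums big).getD 0 : Nat) else 0
  let candidates := rowsums.filter (fun s => decide (s ≠ 0) && decide (s < seed))
  let row : Int := if candidates ≠ [] then
      ((PySem.List.index? rowsums ((PySem.List.min? candidates (fun s => s)).getD 0)).getD 0 : Nat)
    else 0
  (column, row)

-- ===== PRECONDITION & SPEC =====
-- Pre_ excludes exactly the inputs where Python A raises IndexError: the empty matrix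
-- (tab[0]) and ragged matrices with some row shorter than len(tab) (tab[x][y]).
def Pre_najwiekszy_iloraz_suma_rzedu_suma_kolumny (tab : List (List Int)) : Prop :=
  tab ≠ [] ∧ ∀ r ∈ tab, tab.length ≤ r.length
instance (tab : List (List Int)) : Decidable (Pre_najwiekszy_iloraz_suma_rzedu_suma_kolumny tab) := by unfold Pre_najwiekszy_iloraz_suma_rzedu_suma_kolumny; infer_instance

def pvWitness_najwiekszy_iloraz_suma_rzedu_suma_kolumny : List (List Int) := [[1, 2], [3, -4]]

def Spec_najwiekszy_iloraz_suma_rzedu_suma_kolumny (tab : List (List Int)) (out : Int × Int) : Prop := out = najwiekszy_iloraz_suma_rzedu_suma_kolumny_alt tab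
instance (tab : List (List Int)) (out : Int × Int) : Decidable (Spec_najwiekszy_iloraz_suma_rzedu_suma_kolumny tab out) := by unfold Spec_najwiekszy_iloraz_suma_rzedu_suma_kolumny; infer_instance

-- ===== CLAIM (what is proved, stated in full; the proofs are below) =====
def Claim_equal_najwiekszy_iloraz_suma_rzedu_suma_kolumny : Prop := ∀ (tab : List (List Int)), Dom_najwiekszy_iloraz_suma_rzedu_suma_kolumny tab → Pre_najwiekszy_iloraz_suma_rzedu_suma_kolumny tab → Spec_najwiekszy_iloraz_suma_rzedu_suma_kolumny tab (najwiekszy_iloraz_suma_rzedu_suma_kolumny tab)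

-- ===== LEMMAS AND PROOFS =====

-- A 4-accumulator fold whose two halves do not interact is the pair of 2-accumulator folds.
theorem pv_foldl_split {α : Type} (L : List α)
    (f : Int × Int → α → Int × Int) (g : Int × Int → α → Int × Int)
    (p q : Int × Int) :
    L.foldl (fun (st : (Int × Int) × (Int × Int)) x => (f st.1 x, g st.2 x)) (p, q)
      = (L.foldl f p, L.foldl g q) := by
  induction L generalizing p q with
  | nil => rfl
  | cons a t ih => simp [List.foldl, ih]

-- A scan over a mapped range is the corresponding scan over enumerate of the value list.
theorem pv_enum_scan (n : Int) (f : Int → Int) (upd : Int × Int → Int × Int → Int × Int)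
    (init : Int × Int) :
    (PySem.List.enumerate ((PySem.List.pyRange 0 n 1).map f) 0).foldl
        (fun p e => upd p e) init
      = (PySem.List.pyRange 0 n 1).foldl (fun p x => upd p (x, f x)) init := by
  rw [PySem.List.enumerate_eq_map_pyRange (d := f 0)]
  simp only [PySem.List.len_eq, List.length_map, PySem.List.length_pyRange_one]
  rw [List.foldl_map]
  have hn : ((n - 0).toNat : Int) = if 0 ≤ n then n else 0 := by omega
  by_cases h : 0 ≤ n
  · rw [hn, if_pos h]
    refine PySem.List.foldl_congr_mem _ _ _ _ (fun acc x hx => ?_)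
    rw [PySem.List.mem_pyRange_one] at hx
    rw [PySem.List.pyGetD_map_pyRange_of_nonneg f n x (f 0) hx.1 hx.2]
  · rw [PySem.List.pyRange_one_eq_nil (by omega), hn, if_neg h,
        PySem.List.pyRange_one_eq_nil (by omega)]
    rfl

-- enumerate of a mapped range pairs each index with its value
theorem pv_enum_map_pyRange (n : Int) (g : Int → Int) :
    PySem.List.enumerate ((PySem.List.pyRange 0 n 1).map g) 0
      = (PySem.List.pyRange 0 n 1).map (fun y => (y, g y)) := by
  rw [PySem.List.enumerate_eq_map_pyRange (d := g 0)]
  simp only [PySem.List.len_eq, List.length_map, PySem.List.length_pyRange_one]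
  have hn : ((n - 0).toNat : Int) = if 0 ≤ n then n else 0 := by omega
  by_cases h : 0 ≤ n
  · rw [hn, if_pos h]
    refine List.map_congr_left (fun x hx => ?_)
    rw [PySem.List.mem_pyRange_one] at hx
    rw [PySem.List.pyGetD_map_pyRange_of_nonneg g n x (g 0) hx.1 hx.2]
  · rw [PySem.List.pyRange_one_eq_nil (by omega), hn, if_neg h,
        PySem.List.pyRange_one_eq_nil (by omega)]
    rfl

-- the element-wise column-sum sweep over rows L, started from idxs.map g
theorem pv_sweep (n : Int) (a : Int → Int → Int) (L : List Int) :
    ∀ g : Int → Int,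
    L.foldl (fun cs x =>
        (PySem.List.enumerate cs 0).map (fun e => e.2 + a x e.1))
      ((PySem.List.pyRange 0 n 1).map g)
      = (PySem.List.pyRange 0 n 1).map (fun y => L.foldl (fun s x => s + a x y) (g y)) := by
  induction L with
  | nil => intro g; rfl
  | cons r t ih =>
    intro g
    simp only [List.foldl_cons]
    rw [pv_enum_map_pyRange, List.map_map]
    have : ((fun e : Int × Int => e.2 + a r e.1) ∘ fun y => (y, g y)) = fun y => g y + a r y := rfl
    rw [this, ih (fun y => g y + a r y)]

-- first-strict-max scan = (running max, first index attaining it)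
theorem pv_scan_max (cs : List Int) : ∀ (b c k : Int),
    (PySem.List.enumerate cs k).foldl
        (fun p e => if e.2 > p.1 then (e.2, e.1) else p) (b, c)
      = (cs.foldl max b,
         if cs.foldl max b > b then k + (cs.idxOf (cs.foldl max b) : Int) else c) := by
  induction cs with
  | nil => intro b c k; simp
  | cons s t ih =>
    intro b c k
    rw [PySem.List.enumerate_cons]
    simp only [List.foldl_cons]
    by_cases hs : s > b
    · rw [if_pos hs, ih s k (k + 1), max_eq_right (le_of_lt hs)]
      have hm := PySem.List.le_foldl_max t s
      by_cases h2 : t.foldl max s > s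
      · rw [if_pos h2, if_pos (lt_trans hs h2)]
        have hne : s ≠ t.foldl max s := by omega
        rw [List.idxOf_cons_ne _ (by simpa using hne)]
        simp only [Prod.mk.injEq, true_and]
        push_cast
        ring
      · have heq : t.foldl max s = s := le_antisymm (by omega) hm.1
        rw [if_neg h2, heq, if_pos hs, List.idxOf_cons_self]
        simp
    · rw [if_neg hs, ih b c (k + 1), max_eq_left (not_lt.mp hs)]
      by_cases h2 : t.foldl max b > b
      · rw [if_pos h2, if_pos h2]
        have hne : s ≠ t.foldl max b := by omega
        rw [List.idxOf_cons_ne _ (by simpa using hne)]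
        simp only [Prod.mk.injEq, true_and]
        push_cast
        ring
      · rw [if_neg h2, if_neg h2]

-- first-strict-min-over-nonzeros scan = (min over nonzeros seeded with b, first index attaining it)
theorem pv_scan_min (cs : List Int) : ∀ (b c k : Int),
    (PySem.List.enumerate cs k).foldl
        (fun p e => if e.2 < p.1 ∧ e.2 ≠ 0 then (e.2, e.1) else p) (b, c)
      = ((cs.filter (fun s => decide (s ≠ 0))).foldl min b,
         if (cs.filter (fun s => decide (s ≠ 0))).foldl min b < b
         then k + (cs.idxOf ((cs.filter (fun s => decide (s ≠ 0))).foldl min b) : Int) else c) := by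
  induction cs with
  | nil => intro b c k; simp
  | cons s t ih =>
    intro b c k
    rw [PySem.List.enumerate_cons]
    simp only [List.foldl_cons]
    by_cases hs0 : s = 0
    · subst hs0
      rw [if_neg (by simp)]
      have hF : ((0 : Int) :: t).filter (fun s => decide (s ≠ 0)) = t.filter (fun s => decide (s ≠ 0)) := by simp
      rw [hF, ih b c (k + 1)]
      set m := (t.filter (fun s => decide (s ≠ 0))).foldl min b with hm
      by_cases h2 : m < b
      · rw [if_pos h2, if_pos h2]
        have hmem : m ∈ t.filter (fun s => decide (s ≠ 0)) := by
          rcases PySem.List.foldl_min_mem (t.filter (fun s => decide (s ≠ 0))) b with h | h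
          · omega
          · exact h
        have hmne : m ≠ 0 := by simpa using (List.of_mem_filter hmem)
        rw [List.idxOf_cons_ne _ (by simpa using (fun h => hmne h.symm : (0 : Int) ≠ m))]
        simp only [Prod.mk.injEq, true_and]
        push_cast
        ring
      · rw [if_neg h2, if_neg h2]
    · have hF : (s :: t).filter (fun s => decide (s ≠ 0)) = s :: t.filter (fun s => decide (s ≠ 0)) := by simp [hs0]
      rw [hF]
      by_cases hsb : s < b
      · rw [if_pos ⟨hsb, hs0⟩, ih s k (k + 1)]
        simp only [List.foldl_cons]
        rw [min_eq_right (le_of_lt hsb)]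
        set m := (t.filter (fun s => decide (s ≠ 0))).foldl min s with hm
        have hle := PySem.List.foldl_min_le (t.filter (fun s => decide (s ≠ 0))) s
        by_cases h2 : m < s
        · rw [if_pos h2, if_pos (lt_trans h2 hsb)]
          have hne : s ≠ m := by omega
          rw [List.idxOf_cons_ne _ (by simpa using hne)]
          simp only [Prod.mk.injEq, true_and]
          push_cast
          ring
        · have heq : m = s := le_antisymm hle.1 (by omega)
          rw [if_neg h2, heq, if_pos hsb, List.idxOf_cons_self]
          simp
      · rw [if_neg (by tauto), ih b c (k + 1)]
        simp only [List.foldl_cons]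
        rw [min_eq_left (not_lt.mp hsb)]
        set m := (t.filter (fun s => decide (s ≠ 0))).foldl min b with hm
        by_cases h2 : m < b
        · rw [if_pos h2, if_pos h2]
          have hne : s ≠ m := by omega
          rw [List.idxOf_cons_ne _ (by simpa using hne)]
          simp only [Prod.mk.injEq, true_and]
          push_cast
          ring
        · rw [if_neg h2, if_neg h2]

-- dropping elements ≥ b does not change a running min started at a ≤ b
theorem pv_min_filter_lt (l : List Int) : ∀ (a b : Int), a ≤ b →
    (l.filter (fun s => decide (s < b))).foldl min a = l.foldl min a := by
  induction l with
  | nil => intro a b _; rfl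
  | cons s t ih =>
    intro a b hab
    simp only [List.filter_cons]
    by_cases hs : s < b
    · rw [if_pos (by simpa using hs)]
      simp only [List.foldl_cons]
      exact ih (min a s) b (le_trans (min_le_left a s) hab)
    · rw [if_neg (by simpa using hs)]
      simp only [List.foldl_cons]
      rw [min_eq_left (le_trans hab (not_lt.mp hs))]
      exact ih a b hab

-- v ∈ l → idxOf? finds the same first index as idxOf
theorem pv_idxOf?_of_mem (l : List Int) (v : Int) (h : v ∈ l) :
    List.idxOf? v l = some (l.idxOf v) := by
  induction l with
  | nil => simp at h
  | cons a t ih =>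
    by_cases hav : a = v
    · subst hav; simp [List.idxOf?_cons, List.idxOf_cons_self]
    · have hm : v ∈ t := by
        rcases List.mem_cons.mp h with h1 | h1
        · exact absurd h1.symm hav
        · exact h1
      simp [List.idxOf?_cons, hav, ih hm]

-- ===== VERDICT (by name: the statement is the Claim_ definition above) =====
theorem najwiekszy_iloraz_suma_rzedu_suma_kolumny_spec : Claim_equal_najwiekszy_iloraz_suma_rzedu_suma_kolumny := by
  intro tab _ hpre
  obtain ⟨hnil, -⟩ := hpre
  show najwiekszy_iloraz_suma_rzedu_suma_kolumny tab = najwiekszy_iloraz_suma_rzedu_suma_kolumny_alt tab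
  simp only [najwiekszy_iloraz_suma_rzedu_suma_kolumny, najwiekszy_iloraz_suma_rzedu_suma_kolumny_alt]
  set n : Int := (tab.length : Int) with hn
  set L := PySem.List.pyRange 0 n 1 with hL
  set seed : Int := (PySem.List.pyGetD tab 0 []).foldl (· + ·) 0 with hseed
  set colf : Int → Int := fun x =>
      L.foldl (fun (s : Int) y => s + PySem.List.pyGetD (PySem.List.pyGetD tab y []) x 0) 0 with hcolf
  set rowf : Int → Int := fun x =>
      L.foldl (fun (s : Int) y => s + PySem.List.pyGetD (PySem.List.pyGetD tab x []) y 0) 0 with hrowf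
  -- ===== A side: split the interleaved fold into two independent scans =====
  have hinner : ∀ x : Int,
      L.foldl (fun (s : Int × Int) y =>
        (s.1 + PySem.List.pyGetD (PySem.List.pyGetD tab y []) x 0,
         s.2 + PySem.List.pyGetD (PySem.List.pyGetD tab x []) y 0)) (0, 0)
      = (colf x, rowf x) := by
    intro x
    rw [PySem.List.foldl_prod_mk
      (f := fun (s : Int) y => s + PySem.List.pyGetD (PySem.List.pyGetD tab y []) x 0)
      (g := fun (s : Int) y => s + PySem.List.pyGetD (PySem.List.pyGetD tab x []) y 0)]
  have hA :
      L.foldl (fun (st : (Int × Int) × (Int × Int)) x =>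
        let sums :=
          L.foldl (fun (s : Int × Int) y =>
              (s.1 + PySem.List.pyGetD (PySem.List.pyGetD tab y []) x 0,
               s.2 + PySem.List.pyGetD (PySem.List.pyGetD tab x []) y 0)) (0, 0)
        let sr := if sums.2 < st.1.1 ∧ sums.2 ≠ 0 then (sums.2, x) else st.1
        let bc := if sums.1 > st.2.1 then (sums.1, x) else st.2
        (sr, bc)) ((seed, 0), (0, 0))
      = (L.foldl (fun (p : Int × Int) x => if rowf x < p.1 ∧ rowf x ≠ 0 then (rowf x, x) else p) (seed, 0),
         L.foldl (fun (p : Int × Int) x => if colf x > p.1 then (colf x, x) else p) (0, 0)) := by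
    have hbody : ∀ (st : (Int × Int) × (Int × Int)) (x : Int), x ∈ L →
        (let sums :=
          L.foldl (fun (s : Int × Int) y =>
              (s.1 + PySem.List.pyGetD (PySem.List.pyGetD tab y []) x 0,
               s.2 + PySem.List.pyGetD (PySem.List.pyGetD tab x []) y 0)) (0, 0)
         let sr := if sums.2 < st.1.1 ∧ sums.2 ≠ 0 then (sums.2, x) else st.1
         let bc := if sums.1 > st.2.1 then (sums.1, x) else st.2
         (sr, bc))
        = ((if rowf x < st.1.1 ∧ rowf x ≠ 0 then (rowf x, x) else st.1),
           (if colf x > st.2.1 then (colf x, x) else st.2)) := by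
      intro st x _
      simp only [hinner x]
    rw [PySem.List.foldl_congr_mem _ _ _ _ hbody]
    exact pv_foldl_split L
      (fun p x => if rowf x < p.1 ∧ rowf x ≠ 0 then (rowf x, x) else p)
      (fun p x => if colf x > p.1 then (colf x, x) else p) (seed, 0) (0, 0)
  rw [hA]
  -- ===== B side: the sweep computes the two sum tables =====
  have hlen : L.length = n.toNat := by
    rw [hL, PySem.List.length_pyRange_one]; omega
  have hrepl : List.replicate n.toNat (0 : Int) = L.map (fun _ => (0 : Int)) := by
    rw [show (fun _ : Int => (0 : Int)) = Function.const Int (0 : Int) from rfl,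
        List.map_const, hlen]
  have hsweep :
      L.foldl (fun (st : List Int × List Int) x =>
        (st.1 ++ [L.foldl (fun (s : Int) y => s + PySem.List.pyGetD (PySem.List.pyGetD tab x []) y 0) 0],
         (PySem.List.enumerate st.2 0).map
           (fun e => e.2 + PySem.List.pyGetD (PySem.List.pyGetD tab x []) e.1 0)))
        ([], List.replicate n.toNat 0)
      = (L.map rowf, L.map colf) := by
    rw [PySem.List.foldl_prod_mk
      (f := fun (acc : List Int) x => acc ++ [rowf x])
      (g := fun (cs : List Int) x =>
        (PySem.List.enumerate cs 0).map (fun e => e.2 + PySem.List.pyGetD (PySem.List.pyGetD tab x []) e.1 0))]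
    rw [Prod.mk.injEq]
    refine ⟨?_, ?_⟩
    · rw [PySem.List.foldl_append_singleton_eq_map]
      simp
    · rw [hrepl, hL, pv_sweep n (fun x y => PySem.List.pyGetD (PySem.List.pyGetD tab x []) y 0) L (fun _ => 0)]
  rw [hsweep]
  -- ===== column: first-strict-max scan vs max + first index =====
  have hnpos : 0 < n := by
    rw [hn]; simp only [Int.natCast_pos]; exact List.length_pos_of_ne_nil hnil
  obtain ⟨c, t, hct⟩ : ∃ c t, L.map colf = c :: t := by
    cases hLm : L.map colf with
    | nil =>
      exfalso
      have : L = [] := by simpa using hLm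
      rw [hL, PySem.List.pyRange_one_cons (by omega)] at this
      simp at this
    | cons c t => exact ⟨c, t, rfl⟩
  have hcolscan :
      (L.foldl (fun (p : Int × Int) x => if colf x > p.1 then (colf x, x) else p) (0, 0)).2
        = (if (PySem.List.max? (L.map colf) (fun s => s)).getD 0 > 0
           then (((PySem.List.index? (L.map colf) ((PySem.List.max? (L.map colf) (fun s => s)).getD 0)).getD 0 : Nat) : Int)
           else 0) := by
    rw [← pv_enum_scan n colf (fun p e => if e.2 > p.1 then (e.2, e.1) else p) (0, 0), ← hL,
        pv_scan_max (L.map colf) 0 0 0, hct, PySem.List.max?_id_cons]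
    simp only [Option.getD_some]
    have hfold : (c :: t).foldl max 0 = max 0 (t.foldl max c) := by
      simp only [List.foldl_cons]
      exact List.foldl_assoc
    by_cases hbig : t.foldl max c > 0
    · rw [hfold, max_eq_right (le_of_lt hbig)]
      rw [if_pos hbig, if_pos hbig]
      have hmem : t.foldl max c ∈ c :: t := by
        rcases PySem.List.foldl_max_mem t c with h | h
        · rw [h]; exact List.mem_cons_self
        · exact List.mem_cons_of_mem _ h
      rw [PySem.List.index?_eq_idxOf?, pv_idxOf?_of_mem _ _ hmem]
      simp
    · have h0 : max 0 (t.foldl max c) = 0 := max_eq_left (by omega)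
      rw [hfold, h0]
      rw [if_neg (by omega), if_neg hbig]
  -- ===== row: first-strict-min-over-nonzeros scan vs filtered min + first index =====
  have hcand : (L.map rowf).filter (fun s => decide (s ≠ 0) && decide (s < seed))
      = ((L.map rowf).filter (fun s => decide (s ≠ 0))).filter (fun s => decide (s < seed)) := by
    rw [List.filter_filter]
    exact List.filter_congr (fun x _ => Bool.and_comm _ _)
  have hrowscan :
      (L.foldl (fun (p : Int × Int) x => if rowf x < p.1 ∧ rowf x ≠ 0 then (rowf x, x) else p) (seed, 0)).2
        = (if ((L.map rowf).filter (fun s => decide (s ≠ 0) && decide (s < seed))) ≠ [] then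
            (((PySem.List.index? (L.map rowf)
                ((PySem.List.min? ((L.map rowf).filter (fun s => decide (s ≠ 0) && decide (s < seed))) (fun s => s)).getD 0)).getD 0 : Nat) : Int)
          else 0) := by
    rw [← pv_enum_scan n rowf (fun p e => if e.2 < p.1 ∧ e.2 ≠ 0 then (e.2, e.1) else p) (seed, 0), ← hL,
        pv_scan_min (L.map rowf) seed 0 0]
    set F := (L.map rowf).filter (fun s => decide (s ≠ 0)) with hF
    have hmin : ((L.map rowf).filter (fun s => decide (s ≠ 0) && decide (s < seed))).foldl min seed
        = F.foldl min seed := by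
      rw [hcand]
      exact pv_min_filter_lt F seed seed le_rfl
    cases hc : (L.map rowf).filter (fun s => decide (s ≠ 0) && decide (s < seed)) with
    | nil =>
      have hms : F.foldl min seed = seed := by rw [← hmin, hc]; rfl
      rw [hms, if_neg (by omega), if_neg (by simp)]
    | cons d u =>
      have hdmem : d ∈ (L.map rowf).filter (fun s => decide (s ≠ 0) && decide (s < seed)) := by
        rw [hc]; exact List.mem_cons_self
      have hdlt : d < seed := by
        have := List.of_mem_filter hdmem
        simp at this
        exact this.2
      have hmB : ((L.map rowf).filter (fun s => decide (s ≠ 0) && decide (s < seed))).foldl min seed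
          = u.foldl min d := by
        rw [hc]
        simp only [List.foldl_cons]
        rw [min_eq_right (le_of_lt hdlt)]
      have hmlt : F.foldl min seed < seed := by
        rw [← hmin, hmB]
        have := PySem.List.foldl_min_le u d
        omega
      rw [if_pos hmlt, if_pos (by simp)]
      have hmmem : F.foldl min seed ∈ L.map rowf := by
        have hin : F.foldl min seed ∈ (L.map rowf).filter (fun s => decide (s ≠ 0) && decide (s < seed)) := by
          rw [hc, ← hmin, hmB]
          rcases PySem.List.foldl_min_mem u d with h | h
          · rw [h]; exact List.mem_cons_self
          · exact List.mem_cons_of_mem _ h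
        exact List.mem_of_mem_filter hin
      rw [PySem.List.min?_id_cons]
      simp only [Option.getD_some]
      have hmval : u.foldl min d = F.foldl min seed := by
        rw [← hmB]; exact hmin
      rw [hmval, PySem.List.index?_eq_idxOf?, pv_idxOf?_of_mem _ _ hmmem]
      simp
  rw [Prod.mk.injEq]
  exact ⟨hcolscan, hrowscan⟩
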